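-- pv_equiv track=rewrite | github.com/nonkronk/it-hackerrank | easy/Validating UID.py | check_uid
-- ===== SOURCE A (Python) =====
-- def check_uid(uid):
--     # Count numeric char
--     numbers = sum(c.isdigit() for c in uid)
--     # Count upper char
--     upper_chars = sum(c.isupper() for c in uid)
--     if numbers < 3:
--         return False
--     elif upper_chars < 2:
--         return False
--     # Check UID length
--     elif len(uid) != 10:
--         return False
--     # Check is UID alphanum
--     elif uid.isalnum() == False:
--         return False
--     else:
--         # Check repeated char
--         for char in uid:
--             if uid.count(char) > 1:
--                 return False
--     return True
-- ===== SOURCE B (Python) =====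
-- def check_uid(uid):
--     # sort-then-scan: repeats show up as equal neighbours in the sorted string,
--     # and because sorted alnum ASCII groups digits < uppers < lowers, the same
--     # single pass classifies each char by ordinal boundary instead of isdigit/isupper
--     if len(uid) != 10 or not uid.isalnum():
--         return False
--     digits = 0
--     uppers = 0
--     prev = None
--     for c in sorted(uid):
--         if c == prev:
--             return False
--         prev = c
--         if c <= '9':
--             digits += 1
--         elif c <= 'Z':
--             uppers += 1
--     return digits >= 3 and uppers >= 2
-- ===== Notes on version B (the rewrite author's own statement) =====
-- stated objective: faster
-- what changed: Replaces A's two counting passes plus quadratic uid.count duplicate loop by hoisted length/alnum guards and a single sort-then-scan pass: repeats are detected as equal adjacent characters of sorted(uid), and digits/uppercase are counted in the same pass by ordinal boundaries (c <= '9', c <= 'Z') instead of isdigit/isupper.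
import Mathlib
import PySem

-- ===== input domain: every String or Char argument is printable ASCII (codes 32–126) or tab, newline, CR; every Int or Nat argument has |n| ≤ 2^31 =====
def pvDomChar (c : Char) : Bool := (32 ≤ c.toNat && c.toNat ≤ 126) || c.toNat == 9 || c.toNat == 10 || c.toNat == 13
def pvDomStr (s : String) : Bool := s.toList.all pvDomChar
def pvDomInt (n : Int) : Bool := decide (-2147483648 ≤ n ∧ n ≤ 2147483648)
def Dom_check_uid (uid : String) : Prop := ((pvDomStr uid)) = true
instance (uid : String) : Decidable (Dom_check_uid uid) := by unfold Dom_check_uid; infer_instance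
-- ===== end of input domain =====

-- B sorts the characters once and detects repeats as equal neighbours of the sorted
-- list, classifying digits/uppercase by ordinal boundary in the same pass, instead of
-- A's two counting passes plus a quadratic count-based duplicate loop.

-- ===== PORT A =====
def check_uid (uid : String) : Bool :=
  let cs := uid.toList
  -- numbers = sum(c.isdigit() for c in uid); upper_chars = sum(c.isupper() for c in uid)
  let numbers : Int := (cs.map (fun c => if PySem.Chars.isdigit c then (1 : Int) else 0)).sum
  let upper_chars : Int := (cs.map (fun c => if PySem.Chars.isupper c then (1 : Int) else 0)).sum
  if numbers < 3 then false
  else if upper_chars < 2 then false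
  else if PySem.Str.len uid ≠ 10 then false
  else if PySem.Str.strIsalnum uid = false then false
  -- for char in uid: if uid.count(char) > 1: return False   — early-return loop
  else if cs.any (fun char => PySem.List.count cs char > 1) then false
  else true

-- ===== PORT B =====
-- Source B's loop over sorted(uid): prev-based adjacent-repeat test, boundary classification
def uidScan : List Char → Option Char → Int → Int → Bool
  | [], _, digits, uppers => digits ≥ 3 && uppers ≥ 2
  | c :: rest, prev, digits, uppers =>
    if some c = prev then false
    else if c ≤ '9' then uidScan rest (some c) (digits + 1) uppers
    else if c ≤ 'Z' then uidScan rest (some c) digits (uppers + 1)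
    else uidScan rest (some c) digits uppers

def check_uid_alt (uid : String) : Bool :=
  if PySem.Str.len uid ≠ 10 || !(PySem.Str.strIsalnum uid) then false
  else uidScan (PySem.List.sorted uid.toList (fun x => x) false) none 0 0

-- ===== PRECONDITION & SPEC =====
def Spec_check_uid (uid : String) (out : Bool) : Prop := out = check_uid_alt uid
instance (uid : String) (out : Bool) : Decidable (Spec_check_uid uid out) := by unfold Spec_check_uid; infer_instance

-- ===== CLAIM (what is proved, stated in full; the proofs are below) =====
def Claim_equal_check_uid : Prop := ∀ (uid : String), Dom_check_uid uid → Spec_check_uid uid (check_uid uid)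

-- ===== LEMMAS AND PROOFS =====

-- on alphanumeric chars, Python's isdigit test coincides with the ordinal bound c ≤ '9'
lemma alnum_digit (c : Char) (h : PySem.Chars.isalnum c = true) :
    PySem.Chars.isdigit c = decide (c ≤ '9') := by
  simp only [PySem.Chars.isalnum, PySem.Chars.isalpha, PySem.Chars.isdigit, PySem.Chars.isupper,
    PySem.Chars.islower, Bool.or_eq_true, Bool.and_eq_true, decide_eq_true_eq, Char.le_def,
    UInt32.le_iff_toNat_le] at *
  simp only [Bool.and_eq_decide, decide_eq_decide, decide_eq_true_eq,
    show '0'.val.toNat = 48 from rfl, show '9'.val.toNat = 57 from rfl,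
    show 'A'.val.toNat = 65 from rfl, show 'Z'.val.toNat = 90 from rfl,
    show 'a'.val.toNat = 97 from rfl, show 'z'.val.toNat = 122 from rfl] at *
  omega

-- on alphanumeric chars, Python's isupper test coincides with the band '9' < c ≤ 'Z'
lemma alnum_upper (c : Char) (h : PySem.Chars.isalnum c = true) :
    PySem.Chars.isupper c = (!decide (c ≤ '9') && decide (c ≤ 'Z')) := by
  rw [Bool.eq_iff_iff]
  simp only [PySem.Chars.isalnum, PySem.Chars.isalpha, PySem.Chars.isupper, PySem.Chars.isdigit,
    PySem.Chars.islower, Bool.or_eq_true, Bool.and_eq_true, Bool.not_eq_true',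
    decide_eq_true_eq, decide_eq_false_iff_not, not_le, Char.le_def, Char.lt_def,
    UInt32.le_iff_toNat_le, UInt32.lt_iff_toNat_lt,
    show '0'.val.toNat = 48 from rfl, show '9'.val.toNat = 57 from rfl,
    show 'A'.val.toNat = 65 from rfl, show 'Z'.val.toNat = 90 from rfl,
    show 'a'.val.toNat = 97 from rfl, show 'z'.val.toNat = 122 from rfl] at *
  omega

-- A's 0/1 generator sums are countP
lemma sum_ite_eq_countP (p : Char → Bool) (cs : List Char) :
    (cs.map (fun c => if p c then (1 : Int) else 0)).sum = cs.countP p := by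
  induction cs with
  | nil => simp
  | cons c rest ih =>
    rw [List.map_cons, List.sum_cons, List.countP_cons, ih]
    split_ifs <;> push_cast <;> ring

-- A's repeated-char test is the negation of Nodup
lemma any_count_gt_one (cs : List Char) :
    cs.any (fun char => PySem.List.count cs char > 1) = !decide cs.Nodup := by
  rcases h : decide cs.Nodup with _|_
  · simp only [Bool.not_false]
    have h' : ¬ cs.Nodup := of_decide_eq_false h
    rw [List.nodup_iff_count_le_one] at h'
    push_neg at h'
    obtain ⟨a, ha⟩ := h'
    have hmem : a ∈ cs := List.count_pos_iff.mp (by omega)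
    refine List.any_eq_true.mpr ⟨a, hmem, ?_⟩
    simp [PySem.List.count, ha]
  · simp only [Bool.not_true]
    have h' := (of_decide_eq_true h)
    rw [List.nodup_iff_count_le_one] at h'
    refine List.any_eq_false.mpr (fun a _ => ?_)
    simp [PySem.List.count]
    exact h' a

-- B's scan over a ≤-sorted list returns true iff the list is duplicate-free, avoids prev,
-- and the boundary-classified counters pass the thresholds
lemma uidScan_iff (cs : List Char) : ∀ (prev : Option Char) (d u : Int),
    cs.Pairwise (· ≤ ·) → (∀ x ∈ cs, ∀ q, prev = some q → q ≤ x) →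
    (uidScan cs prev d u = true ↔
      cs.Nodup ∧ (∀ q, prev = some q → q ∉ cs) ∧
      3 ≤ d + cs.countP (fun c => decide (c ≤ '9')) ∧
      2 ≤ u + cs.countP (fun c => !decide (c ≤ '9') && decide (c ≤ 'Z'))) := by
  induction cs with
  | nil => intro prev d u _ _; simp [uidScan]
  | cons c rest ih =>
    intro prev d u hs hp
    rw [List.pairwise_cons] at hs
    obtain ⟨hcle, hrest⟩ := hs
    by_cases hceq : some c = prev
    · -- repeated neighbour: the scan returns false, and the prev-avoidance clause fails
      simp only [uidScan]
      rw [if_pos hceq]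
      simp only [Bool.false_eq_true, false_iff]
      rintro ⟨_, hall, _⟩
      exact hall c hceq.symm List.mem_cons_self
    · have hp' : ∀ x ∈ rest, ∀ q, (some c : Option Char) = some q → q ≤ x := by
        rintro x hx q hq; injection hq with hq; subst hq; exact hcle x hx
      have h2 : ∀ q, prev = some q → q ∉ c :: rest := by
        rintro q hq hmem
        rcases List.mem_cons.mp hmem with rfl | hqr
        · exact hceq hq.symm
        · have h1 : q ≤ c := hp c List.mem_cons_self q hq
          have h2' : c ≤ q := hcle q hqr
          exact hceq (by rw [hq, le_antisymm h2' h1])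
      simp only [uidScan, if_neg hceq]
      by_cases h9 : c ≤ '9'
      · rw [if_pos h9, ih _ _ _ hrest hp']
        simp only [List.nodup_cons, List.countP_cons, h9, decide_true, Bool.not_true,
          Bool.false_and, if_true, if_false]
        push_cast
        constructor
        · rintro ⟨hn, hc, h3, h4⟩; exact ⟨⟨hc c rfl, hn⟩, h2, by omega, by omega⟩
        · rintro ⟨⟨hc, hn⟩, _, h3, h4⟩
          exact ⟨hn, fun q hq => (Option.some.inj hq) ▸ hc, by omega, by omega⟩
      · rw [if_neg h9]
        by_cases hZ : c ≤ 'Z'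
        · rw [if_pos hZ, ih _ _ _ hrest hp']
          simp only [List.nodup_cons, List.countP_cons, h9, hZ, decide_true, decide_false,
            Bool.not_false, Bool.true_and, if_true, if_false]
          push_cast
          constructor
          · rintro ⟨hn, hc, h3, h4⟩; exact ⟨⟨hc c rfl, hn⟩, h2, by omega, by omega⟩
          · rintro ⟨⟨hc, hn⟩, _, h3, h4⟩
            exact ⟨hn, fun q hq => (Option.some.inj hq) ▸ hc, by omega, by omega⟩
        · rw [if_neg hZ, ih _ _ _ hrest hp']
          simp only [List.nodup_cons, List.countP_cons, h9, hZ, decide_false,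
            Bool.not_false, Bool.true_and, Bool.and_false, if_false]
          constructor
          · rintro ⟨hn, hc, h3, h4⟩; exact ⟨⟨hc c rfl, hn⟩, h2, h3, h4⟩
          · rintro ⟨⟨hc, hn⟩, _, h3, h4⟩
            exact ⟨hn, fun q hq => (Option.some.inj hq) ▸ hc, h3, h4⟩

-- ===== VERDICT (by name: the statement is the Claim_ definition above) =====
theorem check_uid_spec : Claim_equal_check_uid := by
  intro uid _
  unfold Spec_check_uid
  rw [Bool.eq_iff_iff]
  unfold check_uid check_uid_alt
  simp only [sum_ite_eq_countP, any_count_gt_one]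
  have hperm : (PySem.List.sorted uid.toList (fun x => x) false).Perm uid.toList :=
    PySem.List.sorted_perm uid.toList (fun x => x) false
  have hpw : (PySem.List.sorted uid.toList (fun x => x) false).Pairwise (· ≤ ·) :=
    PySem.List.sorted_pairwise uid.toList (fun x => x)
  have hscan := uidScan_iff (PySem.List.sorted uid.toList (fun x => x) false) none 0 0 hpw
    (by rintro x _ q ⟨⟩)
  by_cases hal : PySem.Str.strIsalnum uid = true
  · have hmem : ∀ c ∈ uid.toList, PySem.Chars.isalnum c = true := by
      have h := hal
      unfold PySem.Str.strIsalnum PySem.Chars.strIsalnum at h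
      simp only [Bool.and_eq_true, List.all_eq_true] at h
      exact h.2
    have hd : uid.toList.countP PySem.Chars.isdigit
        = uid.toList.countP (fun c => decide (c ≤ '9')) :=
      List.countP_congr (fun a ha => by rw [alnum_digit a (hmem a ha)])
    have hu : uid.toList.countP PySem.Chars.isupper
        = uid.toList.countP (fun c => !decide (c ≤ '9') && decide (c ≤ 'Z')) :=
      List.countP_congr (fun a ha => by rw [alnum_upper a (hmem a ha)])
    rw [hperm.nodup_iff, hperm.countP_eq, hperm.countP_eq, ← hd, ← hu] at hscan
    simp only [reduceCtorEq, false_implies, implies_true, true_and] at hscan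
    by_cases hl : PySem.Str.len uid = 10 <;>
    by_cases hnd : uid.toList.Nodup <;>
    by_cases h3 : ((uid.toList.countP PySem.Chars.isdigit : Int) < 3) <;>
    by_cases h2 : ((uid.toList.countP PySem.Chars.isupper : Int) < 2) <;>
      simp_all <;> omega
  · simp only [Bool.not_eq_true] at hal
    simp only [hal, Bool.not_false, Bool.or_true, if_true, if_pos rfl]
    split_ifs <;> simp
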